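-- pv_equiv track=rewrite | github.com/mzafir/hawk-ai-agent | hawk_agent/hawk_chat_agent.py | search_communications
-- ===== SOURCE A (Python) =====
-- def search_communications(entities: list, emails: list) -> list:
--     """Search for communications related to specific entities"""
--     if not entities:
--         return emails[:10]  # Return recent emails if no specific entities
--
--     relevant_emails = []
--
--     for email in emails:
--         subject = email.get('subject', '').lower()
--         body = email.get('body', '').lower()
--         sender = email.get('from', '').lower()
--
--         # Check if any entity appears in the email
--         for entity in entities:
--             entity_lower = entity.lower()
--             if (entity_lower in subject or
--                 entity_lower in body or
--                 entity_lower in sender):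
--                 relevant_emails.append(email)
--                 break
--
--     return relevant_emails
-- ===== SOURCE B (Python) =====
-- def search_communications(entities: list, emails: list) -> list:
--     """Search for communications related to specific entities"""
--     if not entities:
--         return emails[:10]
--
--     texts = [(email.get('subject', '').lower(),
--               email.get('body', '').lower(),
--               email.get('from', '').lower()) for email in emails]
--
--     hit = [False] * len(emails)
--     for ent in [e.lower() for e in entities]:
--         hit = [h or ent in s or ent in b or ent in f
--                for h, (s, b, f) in zip(hit, texts)]
--
--     return [email for email, h in zip(emails, hit) if h]
-- ===== Notes on version B (the rewrite author's own statement) =====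
-- stated objective: alternative
-- what changed: B transposes the loops: it lowercases every email's fields once and every entity once up front, then sweeps a boolean hit-vector entity by entity (a vectorized OR over all emails) and finally filters emails by their flag, instead of A's per-email inner entity loop that re-lowercases each entity for every email.
import Mathlib
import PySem

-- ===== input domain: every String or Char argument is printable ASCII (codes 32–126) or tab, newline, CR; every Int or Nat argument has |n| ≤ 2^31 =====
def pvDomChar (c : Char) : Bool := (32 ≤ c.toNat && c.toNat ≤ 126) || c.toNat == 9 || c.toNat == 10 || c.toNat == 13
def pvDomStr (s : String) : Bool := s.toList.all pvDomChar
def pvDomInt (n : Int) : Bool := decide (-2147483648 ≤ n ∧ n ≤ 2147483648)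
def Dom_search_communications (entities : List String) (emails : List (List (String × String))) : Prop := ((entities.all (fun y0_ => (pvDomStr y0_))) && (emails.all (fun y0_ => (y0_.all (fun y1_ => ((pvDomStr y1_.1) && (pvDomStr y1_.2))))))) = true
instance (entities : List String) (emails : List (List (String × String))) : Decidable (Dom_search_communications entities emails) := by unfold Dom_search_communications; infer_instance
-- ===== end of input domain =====

-- B transposes the loops: fields and entities are lowercased once up front, a boolean
-- hit-vector is OR-swept entity by entity, and emails are filtered by their flag
-- (objective: alternative; same asymptotic cost, each string lowercased once).

-- dict.get(k, '') on an association list (first match), shared dict primitive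
def pvDictGet (email : List (String × String)) (k : String) : String :=
  (((email.find? (fun p => p.1 == k)).map (fun p => p.2)).getD "")

-- ===== PORT A =====
-- the inner 'for entity in entities: … break' loop of A
def pvEntLoop (subject body sender : String) : List String → Bool
  | [] => false
  | e :: rest =>
    let el := PySem.Str.lower e
    if PySem.Str.isIn el subject || PySem.Str.isIn el body || PySem.Str.isIn el sender then
      true
    else pvEntLoop subject body sender rest

def search_communications (entities : List String) (emails : List (List (String × String))) : List (List (String × String)) :=
  if entities = [] then PySem.List.slice emails none (some 10)
  else
    emails.foldl (fun acc email =>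
      let subject := PySem.Str.lower (pvDictGet email "subject")
      let body := PySem.Str.lower (pvDictGet email "body")
      let sender := PySem.Str.lower (pvDictGet email "from")
      if pvEntLoop subject body sender entities then acc ++ [email] else acc) []

-- ===== PORT B =====
-- lowercased (subject, body, from) of one email
def pvText (email : List (String × String)) : String × String × String :=
  (PySem.Str.lower (pvDictGet email "subject"),
   PySem.Str.lower (pvDictGet email "body"),
   PySem.Str.lower (pvDictGet email "from"))

def search_communications_alt (entities : List String) (emails : List (List (String × String))) : List (List (String × String)) :=
  if entities = [] then PySem.List.slice emails none (some 10)
  else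
    let texts := emails.map pvText
    let hit := (entities.map PySem.Str.lower).foldl
      (fun hit ent => List.zipWith
        (fun h t => h || PySem.Str.isIn ent t.1 || PySem.Str.isIn ent t.2.1 || PySem.Str.isIn ent t.2.2) hit texts)
      (List.replicate emails.length false)
    ((emails.zip hit).filter (fun p => p.2)).map (fun p => p.1)

-- ===== PRECONDITION & SPEC =====
def Spec_search_communications (entities : List String) (emails : List (List (String × String))) (out : List (List (String × String))) : Prop := out = search_communications_alt entities emails
instance (entities : List String) (emails : List (List (String × String))) (out : List (List (String × String))) : Decidable (Spec_search_communications entities emails out) := by unfold Spec_search_communications; infer_instance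

-- ===== CLAIM (what is proved, stated in full; the proofs are below) =====
def Claim_equal_search_communications : Prop := ∀ (entities : List String) (emails : List (List (String × String))), Dom_search_communications entities emails → Spec_search_communications entities emails (search_communications entities emails)

-- ===== LEMMAS AND PROOFS =====

-- entity matches a lowered (subject, body, from) triple
def pvPred (ent : String) (t : String × String × String) : Bool :=
  PySem.Str.isIn ent t.1 || PySem.Str.isIn ent t.2.1 || PySem.Str.isIn ent t.2.2

theorem pvEntLoop_eq_any (s b f : String) (es : List String) :
    pvEntLoop s b f es = es.any (fun e => pvPred (PySem.Str.lower e) (s, b, f)) := by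
  induction es with
  | nil => rfl
  | cons e rest ih =>
    simp [pvEntLoop, pvPred, ih]

theorem pvZipWith_zipWith {α β : Type} (f g : β → α → β) :
    ∀ (hs : List β) (ts : List α),
      List.zipWith f (List.zipWith g hs ts) ts
        = List.zipWith (fun h t => f (g h t) t) hs ts := by
  intro hs
  induction hs with
  | nil => intro ts; rfl
  | cons h hs ih =>
    intro ts
    cases ts with
    | nil => rfl
    | cons t ts => simp [List.zipWith, ih]

theorem pvZipWith_left {α β : Type} :
    ∀ (hs : List β) (ts : List α), hs.length ≤ ts.length →
      List.zipWith (fun h _ => h) hs ts = hs := by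
  intro hs
  induction hs with
  | nil => intro ts _; rfl
  | cons h hs ih =>
    intro ts hl
    cases ts with
    | nil => simp at hl
    | cons t ts =>
      simp only [List.zipWith]
      simp only [List.length_cons, Nat.add_le_add_iff_right] at hl
      rw [ih ts hl]

theorem pvFoldHit (texts : List (String × String × String)) :
    ∀ (es : List String) (hs : List Bool), hs.length ≤ texts.length →
      es.foldl (fun hit ent => List.zipWith (fun h t => h || pvPred ent t) hit texts) hs
        = List.zipWith (fun h t => h || es.any (fun e => pvPred e t)) hs texts := by
  intro es
  induction es with
  | nil =>
    intro hs hl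
    simp only [List.foldl_nil, List.any_nil, Bool.or_false]
    exact (pvZipWith_left hs texts hl).symm
  | cons e es ih =>
    intro hs hl
    simp only [List.foldl_cons]
    rw [ih _ (by rw [List.length_zipWith]; omega)]
    rw [pvZipWith_zipWith]
    simp only [List.any_cons, Bool.or_assoc]

theorem pvZipWith_replicate {α β : Type} (f : β → α → β) (c : β) :
    ∀ (l : List α), List.zipWith f (List.replicate l.length c) l = l.map (f c) := by
  intro l
  induction l with
  | nil => rfl
  | cons x l ih => simp [List.replicate_succ, ih]

theorem pvZipFilter {α : Type} (q : α → Bool) :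
    ∀ (l : List α),
      (((l.zip (l.map q)).filter (fun p => p.2)).map (fun p => p.1)) = l.filter q := by
  intro l
  induction l with
  | nil => rfl
  | cons x l ih =>
    simp only [List.map_cons, List.zip_cons_cons, List.filter_cons]
    by_cases h : q x = true
    · simp [h, ih]
    · simp only [Bool.not_eq_true] at h
      simp [h, ih]

-- ===== VERDICT (by name: the statement is the Claim_ definition above) =====
theorem search_communications_spec : Claim_equal_search_communications := by
  intro entities emails _
  unfold Spec_search_communications search_communications search_communications_alt
  by_cases he : entities = []
  · simp [he]
  · simp only [he, if_false]
    -- A side: the append-loop is a filter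
    rw [PySem.List.foldl_append_if_eq_filter
      (fun email => pvEntLoop (PySem.Str.lower (pvDictGet email "subject"))
        (PySem.Str.lower (pvDictGet email "body"))
        (PySem.Str.lower (pvDictGet email "from")) entities)]
    -- B side: normalize the OR-chain, collapse the hit-vector fold
    have hstep : ∀ ent : String, (fun (h : Bool) (t : String × String × String) =>
          h || PySem.Str.isIn ent t.1 || PySem.Str.isIn ent t.2.1 || PySem.Str.isIn ent t.2.2)
        = (fun h t => h || pvPred ent t) := by
      intro ent; funext h t; simp [pvPred, Bool.or_assoc]
    simp only [hstep]
    rw [pvFoldHit (emails.map pvText) (entities.map PySem.Str.lower)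
        (List.replicate emails.length false) (by simp)]
    rw [show List.replicate emails.length false
          = List.replicate (emails.map pvText).length false by simp]
    rw [pvZipWith_replicate]
    simp only [List.map_map, List.nil_append, Bool.false_or, Function.comp_def]
    rw [pvZipFilter (fun em =>
      (entities.map PySem.Str.lower).any (fun e => pvPred e (pvText em))) emails]
    apply List.filter_congr
    intro em _
    rw [pvEntLoop_eq_any, List.any_map]
    rfl
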